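-- pv_equiv track=rewrite | github.com/MarbleSodas/Godoty | backend/api/config_routes.py | _extract_provider
-- ===== SOURCE A (Python) =====
-- def _extract_provider(model_id: str) -> str:
--     """Extract provider name from model ID."""
--     provider_map = {
--         "google/": "Google",
--         "x-ai/": "xAI",
--         "anthropic/": "Anthropic",
--         "minimax/": "Minimax",
--         "openai/": "OpenAI",
--         "z-ai/": "Zhipu AI",
--         "meta-llama/": "Meta"
--     }
--
--     for prefix, provider in provider_map.items():
--         if model_id.startswith(prefix):
--             return provider
--
--     # Default: capitalize first part before slash
--     if "/" in model_id:
--         return model_id.split("/")[0].capitalize()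
--     return "Unknown"
-- ===== SOURCE B (Python) =====
-- def _extract_provider(model_id: str) -> str:
--     """Extract provider name from model ID."""
--     name, sep, _rest = model_id.partition("/")
--     if not sep:
--         return "Unknown"
--     providers = {
--         "google": "Google",
--         "x-ai": "xAI",
--         "anthropic": "Anthropic",
--         "minimax": "Minimax",
--         "openai": "OpenAI",
--         "z-ai": "Zhipu AI",
--         "meta-llama": "Meta",
--     }
--     return providers.get(name, name.capitalize())
-- ===== Notes on version B (the rewrite author's own statement) =====
-- stated objective: simpler
-- what changed: Replaces the linear scan over seven startswith-prefix checks (plus a separate split-based fallback) by a single partition of the id at the first slash followed by one dict lookup keyed by the bare provider name, with capitalize as the lookup default.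
import Mathlib
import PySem

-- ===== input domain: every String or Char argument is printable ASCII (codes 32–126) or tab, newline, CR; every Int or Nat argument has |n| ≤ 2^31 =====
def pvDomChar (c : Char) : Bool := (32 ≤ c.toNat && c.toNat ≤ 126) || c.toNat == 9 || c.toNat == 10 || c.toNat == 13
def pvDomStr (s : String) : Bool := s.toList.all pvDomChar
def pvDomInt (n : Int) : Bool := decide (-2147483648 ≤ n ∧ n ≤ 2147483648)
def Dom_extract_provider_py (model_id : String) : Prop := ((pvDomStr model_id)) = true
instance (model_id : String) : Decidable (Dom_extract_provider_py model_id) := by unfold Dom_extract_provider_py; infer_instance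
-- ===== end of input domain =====

-- B replaces A's linear startswith scan over slash-suffixed prefixes (plus a separate
-- split-based fallback) by one partition at the first slash and a single dict lookup on the
-- bare provider name (objective: simpler); return values are identical.

-- Python str.capitalize, ported by hand (PySem has no capitalize): upper the first
-- character, lower the rest; exact on the ASCII domain.
def pyCapitalizeChars (l : List Char) : List Char :=
  match l with
  | [] => []
  | c :: cs => PySem.Chars.upperChar c :: PySem.Chars.lower cs

-- ===== PORT A =====
def extract_provider_py_providerMap : PySem.Dict String String :=
  PySem.Dict.ofList [("google/", "Google"), ("x-ai/", "xAI"), ("anthropic/", "Anthropic"),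
    ("minimax/", "Minimax"), ("openai/", "OpenAI"), ("z-ai/", "Zhipu AI"), ("meta-llama/", "Meta")]

-- A's for-loop over provider_map.items(): the first matching prefix wins.
def extract_provider_py_loop (model_id : String) : List (String × String) → Option String
  | [] => none
  | (pfx, provider) :: rest =>
      if PySem.Str.startswith model_id pfx then some provider
      else extract_provider_py_loop model_id rest

def extract_provider_py (model_id : String) : String :=
  (extract_provider_py_loop model_id extract_provider_py_providerMap.items).getD
    (if PySem.Str.isIn "/" model_id then
      -- model_id.split("/")[0].capitalize(); split("/") is never empty, so [0] = headD
      String.ofList (pyCapitalizeChars ((((PySem.Str.split? model_id "/").getD []).headD "").toList))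
    else "Unknown")

-- ===== PORT B =====
def extract_provider_py_alt (model_id : String) : String :=
  -- model_id.partition("/") ported by hand (PySem has no partition): name = the characters
  -- before the first '/', and the separator is nonempty iff '/' occurs; exact on all inputs.
  let name : List Char := model_id.toList.takeWhile (fun c => c ≠ '/')
  if '/' ∈ model_id.toList then
    (PySem.Dict.ofList [("google", "Google"), ("x-ai", "xAI"), ("anthropic", "Anthropic"),
      ("minimax", "Minimax"), ("openai", "OpenAI"), ("z-ai", "Zhipu AI"),
      ("meta-llama", "Meta")]).getD (String.ofList name) (String.ofList (pyCapitalizeChars name))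
  else "Unknown"

-- ===== PRECONDITION & SPEC =====
def Spec_extract_provider_py (model_id : String) (out : String) : Prop := out = extract_provider_py_alt model_id
instance (model_id : String) (out : String) : Decidable (Spec_extract_provider_py model_id out) := by unfold Spec_extract_provider_py; infer_instance

-- ===== CLAIM (what is proved, stated in full; the proofs are below) =====
def Claim_equal_extract_provider_py : Prop := ∀ (model_id : String), Dom_extract_provider_py model_id → Spec_extract_provider_py model_id (extract_provider_py model_id)

-- ===== LEMMAS AND PROOFS =====

-- A char list containing '/' decomposes as (chars before the first '/') ++ '/' :: rest.
theorem takeWhile_slash_decomp (l : List Char) (h : '/' ∈ l) :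
    ∃ r, l = l.takeWhile (fun c => !decide (c = '/')) ++ '/' :: r := by
  induction l with
  | nil => cases h
  | cons c rest ih =>
      by_cases hc : c = '/'
      · subst hc
        refine ⟨rest, ?_⟩
        rw [List.takeWhile_cons_of_neg (by simp)]
        simp
      · have hm : '/' ∈ rest := by
          rcases List.mem_cons.mp h with h1 | h1
          · exact absurd h1.symm hc
          · exact h1
        obtain ⟨r, hr⟩ := ih hm
        refine ⟨r, ?_⟩
        rw [List.takeWhile_cons_of_pos (by simp [hc])]
        simpa using hr

theorem takeWhile_append_slash (t r : List Char) (ht : '/' ∉ t) :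
    (t ++ '/' :: r).takeWhile (fun c => !decide (c = '/')) = t := by
  induction t with
  | nil => exact List.takeWhile_cons_of_neg (by simp)
  | cons c cs ih =>
      have hc : c ≠ '/' := fun h => ht (h ▸ List.mem_cons_self ..)
      rw [List.cons_append, List.takeWhile_cons_of_pos (by simp [hc])]
      rw [ih (fun h => ht (List.mem_cons_of_mem _ h))]

-- startswith against a prefix ending in '/' ↔ '/' occurs and the first token equals it.
theorem startswith_slash_iff (l t : List Char) (ht : '/' ∉ t) :
    PySem.Chars.startswith l (t ++ ['/']) = true ↔
      ('/' ∈ l ∧ l.takeWhile (fun c => !decide (c = '/')) = t) := by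
  constructor
  · intro h
    obtain ⟨r, hr⟩ := (PySem.Chars.startswith_iff _ _).mp h
    have hl : l = t ++ '/' :: r := by simpa using hr.symm
    subst hl
    exact ⟨by simp, takeWhile_append_slash t r ht⟩
  · rintro ⟨hm, hk⟩
    obtain ⟨r, hr⟩ := takeWhile_slash_decomp l hm
    rw [hk] at hr
    refine (PySem.Chars.startswith_iff _ _).mpr ⟨r, ?_⟩
    simp [hr]

-- str.startswith on a key "name/" decides whether the first token is exactly "name".
theorem startswith_key (m t k : String)
    (hk : k.toList = t.toList ++ ['/']) (ht : '/' ∉ t.toList) (h : '/' ∈ m.toList) :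
    PySem.Str.startswith m k =
      decide (m.toList.takeWhile (fun c => !decide (c = '/')) = t.toList) := by
  have hb : PySem.Str.startswith m k = PySem.Chars.startswith m.toList k.toList := by
    simp
  rw [hb, hk]
  by_cases hd : m.toList.takeWhile (fun c => !decide (c = '/')) = t.toList
  · simp only [hd, decide_true]
    exact (startswith_slash_iff _ _ ht).mpr ⟨h, hd⟩
  · simp only [hd, decide_false]
    by_contra hcon
    have : PySem.Chars.startswith m.toList (t.toList ++ ['/']) = true := by
      revert hcon; cases PySem.Chars.startswith m.toList (t.toList ++ ['/']) <;> simp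
    exact hd ((startswith_slash_iff _ _ ht).mp this).2

-- without a '/' in the id, no slash-containing prefix matches.
theorem startswith_false (m k : String) (hk : '/' ∈ k.toList) (h : '/' ∉ m.toList) :
    PySem.Str.startswith m k = false := by
  by_contra hcon
  have hb : PySem.Chars.startswith m.toList k.toList = true := by
    have : PySem.Str.startswith m k = true := by
      revert hcon; cases PySem.Str.startswith m k <;> simp
    simpa using this
  obtain ⟨r, hr⟩ := (PySem.Chars.startswith_iff _ _).mp hb
  exact h (hr ▸ List.mem_append.mpr (Or.inl hk))

-- the head of splitOn l ['/'] is the first token (invariant of the fueled go loop).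
theorem splitOn_go_head (s : Char) :
    ∀ (fuel : Nat) (l cur : List Char) (acc : List (List Char)), l.length ≤ fuel →
      ∃ tail, PySem.Chars.splitOn.go [s] fuel l cur acc =
        acc.reverse ++ (cur.reverse ++ l.takeWhile (fun c => !decide (c = s))) :: tail := by
  intro fuel
  induction fuel with
  | zero =>
      intro l cur acc hl
      have hnil : l = [] := List.length_eq_zero_iff.mp (Nat.le_zero.mp hl)
      subst hnil
      exact ⟨[], by simp [PySem.Chars.splitOn.go]⟩
  | succ n ih =>
      intro l cur acc hl
      cases l with
      | nil => exact ⟨[], by simp [PySem.Chars.splitOn.go]⟩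
      | cons c rest =>
          by_cases hc : c = s
          · subst hc
            have hpre : List.isPrefixOf [c] (c :: rest) = true := by
              simp [List.isPrefixOf]
            obtain ⟨tl, htl⟩ := ih rest [] (cur.reverse :: acc)
              (Nat.le_of_succ_le_succ hl)
            refine ⟨rest.takeWhile (fun x => !decide (x = c)) :: tl, ?_⟩
            rw [PySem.Chars.splitOn.go, hpre]
            simp only [if_true, List.length_cons, List.length_nil, List.drop_succ_cons,
              List.drop_zero] at htl ⊢
            rw [htl, List.takeWhile_cons_of_neg (by simp)]
            simp
          · have hpre : List.isPrefixOf [s] (c :: rest) = false := by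
              simp only [List.isPrefixOf, Bool.and_eq_false_iff]
              left
              simp only [beq_eq_false_iff_ne, ne_eq]
              exact fun hh => hc hh.symm
            obtain ⟨tl, htl⟩ := ih rest (c :: cur) acc (Nat.le_of_succ_le_succ hl)
            refine ⟨tl, ?_⟩
            rw [PySem.Chars.splitOn.go, hpre]
            simp only [Bool.false_eq_true, if_false]
            rw [htl, List.takeWhile_cons_of_pos (by simp [hc])]
            simp

theorem splitOn_head (l : List Char) (s : Char) :
    ∃ tail, PySem.Chars.splitOn l [s] = (l.takeWhile (fun c => !decide (c = s))) :: tail := by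
  obtain ⟨tl, htl⟩ := splitOn_go_head s (l.length + 1) l [] [] (Nat.le_succ _)
  exact ⟨tl, by simpa [PySem.Chars.splitOn] using htl⟩

theorem isIn_slash (l : List Char) :
    PySem.Chars.isIn ['/'] l = true ↔ '/' ∈ l := by
  rw [PySem.Chars.isIn_iff_infix]
  constructor
  · intro h; exact h.mem (by simp)
  · intro h
    obtain ⟨a, b, hab⟩ := List.append_of_mem h
    exact ⟨a, b, by simp [hab]⟩

-- a bare-name key does not match a different first token.
theorem key_beq_false (tok : List Char) (t : String) (h : ¬ tok = t.toList) :
    (t == String.ofList tok) = false := by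
  simp only [beq_eq_false_iff_ne, ne_eq]
  intro heq
  exact h (by simpa using (congrArg String.toList heq).symm)

theorem extract_provider_py_eq_alt (model_id : String) :
    extract_provider_py model_id = extract_provider_py_alt model_id := by
  by_cases h : '/' ∈ model_id.toList
  · -- the id contains a slash: both sides are determined by the first token
    have e1 := startswith_key model_id "google" "google/" (by decide) (by decide) h
    have e2 := startswith_key model_id "x-ai" "x-ai/" (by decide) (by decide) h
    have e3 := startswith_key model_id "anthropic" "anthropic/" (by decide) (by decide) h
    have e4 := startswith_key model_id "minimax" "minimax/" (by decide) (by decide) h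
    have e5 := startswith_key model_id "openai" "openai/" (by decide) (by decide) h
    have e6 := startswith_key model_id "z-ai" "z-ai/" (by decide) (by decide) h
    have e7 := startswith_key model_id "meta-llama" "meta-llama/" (by decide) (by decide) h
    have hitems : extract_provider_py_providerMap.items =
        [("google/", "Google"), ("x-ai/", "xAI"), ("anthropic/", "Anthropic"),
         ("minimax/", "Minimax"), ("openai/", "OpenAI"), ("z-ai/", "Zhipu AI"),
         ("meta-llama/", "Meta")] := rfl
    obtain ⟨tail, hsplit⟩ := splitOn_head model_id.toList '/'
    have hdef : (((PySem.Str.split? model_id "/").getD []).headD "").toList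
        = model_id.toList.takeWhile (fun c => !decide (c = '/')) := by
      simp [PySem.Str.split?, PySem.Chars.split?, hsplit]
    simp only [extract_provider_py, extract_provider_py_alt, extract_provider_py_loop,
      hitems, ne_eq, decide_not]
    rw [if_pos h, hdef, e1, e2, e3, e4, e5, e6, e7]
    by_cases h1 : model_id.toList.takeWhile (fun c => !decide (c = '/')) = "google".toList
    · simp only [h1, String.ofList_toList]; rfl
    by_cases h2 : model_id.toList.takeWhile (fun c => !decide (c = '/')) = "x-ai".toList
    · simp only [h2, String.ofList_toList]; rfl
    by_cases h3 : model_id.toList.takeWhile (fun c => !decide (c = '/')) = "anthropic".toList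
    · simp only [h3, String.ofList_toList]; rfl
    by_cases h4 : model_id.toList.takeWhile (fun c => !decide (c = '/')) = "minimax".toList
    · simp only [h4, String.ofList_toList]; rfl
    by_cases h5 : model_id.toList.takeWhile (fun c => !decide (c = '/')) = "openai".toList
    · simp only [h5, String.ofList_toList]; rfl
    by_cases h6 : model_id.toList.takeWhile (fun c => !decide (c = '/')) = "z-ai".toList
    · simp only [h6, String.ofList_toList]; rfl
    by_cases h7 : model_id.toList.takeWhile (fun c => !decide (c = '/')) = "meta-llama".toList
    · simp only [h7, String.ofList_toList]; rfl
    · -- default: neither side names a provider; both capitalize the first token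
      have hIn : PySem.Str.isIn "/" model_id = true := by
        have := (isIn_slash model_id.toList).mpr h
        simpa [PySem.Str.isIn] using this
      have hnc : (PySem.Dict.ofList [("google", "Google"), ("x-ai", "xAI"),
          ("anthropic", "Anthropic"), ("minimax", "Minimax"), ("openai", "OpenAI"),
          ("z-ai", "Zhipu AI"), ("meta-llama", "Meta")]).contains
          (String.ofList (model_id.toList.takeWhile (fun c => !decide (c = '/')))) = false := by
        simp only [PySem.Dict.contains, List.any_eq_false]
        intro p hp
        have hps : (PySem.Dict.ofList [("google", "Google"), ("x-ai", "xAI"),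
            ("anthropic", "Anthropic"), ("minimax", "Minimax"), ("openai", "OpenAI"),
            ("z-ai", "Zhipu AI"), ("meta-llama", "Meta")]).items =
            [("google", "Google"), ("x-ai", "xAI"), ("anthropic", "Anthropic"),
             ("minimax", "Minimax"), ("openai", "OpenAI"), ("z-ai", "Zhipu AI"),
             ("meta-llama", "Meta")] := rfl
        rw [hps] at hp
        fin_cases hp <;>
          simp only [key_beq_false _ _ h1, key_beq_false _ _ h2, key_beq_false _ _ h3,
            key_beq_false _ _ h4, key_beq_false _ _ h5, key_beq_false _ _ h6,
            key_beq_false _ _ h7, Bool.false_eq_true, not_false_eq_true]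
      rw [PySem.Dict.getD_of_not_contains _ _ hnc]
      have f1 := decide_eq_false h1
      have f2 := decide_eq_false h2
      have f3 := decide_eq_false h3
      have f4 := decide_eq_false h4
      have f5 := decide_eq_false h5
      have f6 := decide_eq_false h6
      have f7 := decide_eq_false h7
      simp only [f1, f2, f3, f4, f5, f6, f7, Bool.false_eq_true, if_false, Option.getD_none]
      rw [if_pos hIn]
  · -- no slash: every prefix check fails and both sides return "Unknown"
    have hIn : PySem.Str.isIn "/" model_id = false := by
      by_contra hcon
      have hb : PySem.Chars.isIn ['/'] model_id.toList = true := by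
        have : PySem.Str.isIn "/" model_id = true := by
          revert hcon; cases PySem.Str.isIn "/" model_id <;> simp
        simpa [PySem.Str.isIn] using this
      exact h ((isIn_slash _).mp hb)
    have hitems : extract_provider_py_providerMap.items =
        [("google/", "Google"), ("x-ai/", "xAI"), ("anthropic/", "Anthropic"),
         ("minimax/", "Minimax"), ("openai/", "OpenAI"), ("z-ai/", "Zhipu AI"),
         ("meta-llama/", "Meta")] := rfl
    simp only [extract_provider_py, extract_provider_py_alt, extract_provider_py_loop, hitems,
      startswith_false model_id "google/" (by decide) h,
      startswith_false model_id "x-ai/" (by decide) h,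
      startswith_false model_id "anthropic/" (by decide) h,
      startswith_false model_id "minimax/" (by decide) h,
      startswith_false model_id "openai/" (by decide) h,
      startswith_false model_id "z-ai/" (by decide) h,
      startswith_false model_id "meta-llama/" (by decide) h,
      hIn, Bool.false_eq_true, if_false, Option.getD_none]
    rw [if_neg h]

-- ===== VERDICT (by name: the statement is the Claim_ definition above) =====
theorem extract_provider_py_spec : Claim_equal_extract_provider_py := by
  intro model_id _
  exact extract_provider_py_eq_alt model_id
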